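-- pv_equiv track=rewrite | github.com/jdye64/nv-ingest | src/morpheus_pdf_ingest/modules/nemo_doc_splitter.py | _split_into_units
-- ===== SOURCE A (Python) =====
-- from typing import List, Literal, Any
--
-- def _split_into_units(text: str, split_by: Literal["word", "sentence", "passage"]) -> List[str]:
--     if split_by == "passage":
--         split_at = "\n\n"
--     elif split_by == "sentence":
--         split_at = "."  # why not ?,!, etc..?
--     elif split_by == "word":
--         split_at = " "
--     else:
--         raise NotImplementedError(
--             "DocumentSplitter only supports 'passage', 'sentence'"
--             " or 'word' split_by options."
--         )
--     units = text.split(split_at)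
--     # Add the delimiter back to all units except the last one
--     for i in range(len(units) - 1):
--         units[i] += split_at
--
--     return units
-- ===== SOURCE B (Python) =====
-- from typing import List, Literal
--
-- def _split_into_units(text: str, split_by: Literal["word", "sentence", "passage"]) -> List[str]:
--     if split_by == "passage":
--         split_at = "\n\n"
--     elif split_by == "sentence":
--         split_at = "."  # why not ?,!, etc..?
--     elif split_by == "word":
--         split_at = " "
--     else:
--         raise NotImplementedError(
--             "DocumentSplitter only supports 'passage', 'sentence'"
--             " or 'word' split_by options."
--         )
--     # One explicit scan: cut off one delimiter-terminated unit at a time,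
--     # keeping the delimiter, instead of split() followed by a patch-up loop.
--     units = []
--     rest = text
--     while True:
--         pos = rest.find(split_at)
--         if pos == -1:
--             units.append(rest)
--             return units
--         cut = pos + len(split_at)
--         units.append(rest[:cut])
--         rest = rest[cut:]
-- ===== Notes on version B (the rewrite author's own statement) =====
-- stated objective: alternative
-- what changed: B replaces split() followed by a loop that re-appends the delimiter with a single explicit scan that uses find() to cut off one delimiter-terminated unit at a time.
import Mathlib
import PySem

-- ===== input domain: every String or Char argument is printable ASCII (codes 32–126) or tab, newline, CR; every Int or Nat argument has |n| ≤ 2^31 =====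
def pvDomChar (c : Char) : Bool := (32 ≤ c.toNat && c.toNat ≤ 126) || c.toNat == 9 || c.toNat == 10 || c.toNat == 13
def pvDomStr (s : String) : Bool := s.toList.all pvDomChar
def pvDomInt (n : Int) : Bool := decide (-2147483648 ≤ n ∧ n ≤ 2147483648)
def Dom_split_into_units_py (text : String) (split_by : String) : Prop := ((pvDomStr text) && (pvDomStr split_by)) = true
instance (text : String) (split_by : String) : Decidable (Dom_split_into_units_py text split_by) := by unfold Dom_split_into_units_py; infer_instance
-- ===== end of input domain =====

-- B differs from A only in structure (one find-based scan instead of split-then-patch); return values agree on Pre_.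

-- ===== PORT A =====
-- A's loop "for i in range(len(units)-1): units[i] += split_at" appends the
-- delimiter to every unit except the last one.
def pyAddSepButLast (units : List (List Char)) (sep : List Char) : List (List Char) :=
  match units with
  | [] => []
  | [u] => [u]
  | u :: v :: rest => (u ++ sep) :: pyAddSepButLast (v :: rest) sep

def pySplitKeepA (text : String) (sep : String) : List String :=
  (pyAddSepButLast (PySem.Chars.splitOn text.toList sep.toList) sep.toList).map String.ofList

def split_into_units_py (text : String) (split_by : String) : List String :=
  if split_by == "passage" then pySplitKeepA text "\n\n"
  else if split_by == "sentence" then pySplitKeepA text "."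
  else if split_by == "word" then pySplitKeepA text " "
  else []  -- Python raises NotImplementedError here; excluded by Pre_

-- ===== PORT B =====
-- B's while loop: find the next delimiter in the remaining text, cut off the
-- unit including the delimiter; the `sep.length = 0` disjunct only makes the
-- recursion total (B's delimiters are never empty).
def altScan (sep : List Char) (l : List Char) : List (List Char) :=
  let p := PySem.Chars.find l sep
  if sep.length = 0 ∨ p = -1 then [l]
  else l.take (p.toNat + sep.length) :: altScan sep (l.drop (p.toNat + sep.length))
termination_by l.length
decreasing_by
  rename_i h
  rw [not_or] at h
  have hinf : sep <:+: l := (PySem.Chars.find_ne_neg_one_iff l sep).mp h.2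
  have hl : 0 < l.length :=
    lt_of_lt_of_le (List.length_pos_iff.mpr (fun hs => h.1 (by simp [hs]))) hinf.length_le
  have hsep : 0 < sep.length := Nat.pos_of_ne_zero h.1
  simp only [List.length_drop]
  omega

def pySplitKeepB (text : String) (sep : String) : List String :=
  (altScan sep.toList text.toList).map String.ofList

def split_into_units_py_alt (text : String) (split_by : String) : List String :=
  if split_by == "passage" then pySplitKeepB text "\n\n"
  else if split_by == "sentence" then pySplitKeepB text "."
  else if split_by == "word" then pySplitKeepB text " "
  else []  -- Python raises NotImplementedError here; excluded by Pre_

-- ===== PRECONDITION & SPEC =====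
-- A raises NotImplementedError for any split_by outside the three options.
def Pre_split_into_units_py (text : String) (split_by : String) : Prop :=
  split_by = "passage" ∨ split_by = "sentence" ∨ split_by = "word"
instance (text : String) (split_by : String) : Decidable (Pre_split_into_units_py text split_by) := by unfold Pre_split_into_units_py; infer_instance
def pvWitness_split_into_units_py : String × String := ("a b", "word")

def Spec_split_into_units_py (text : String) (split_by : String) (out : List String) : Prop := out = split_into_units_py_alt text split_by
instance (text : String) (split_by : String) (out : List String) : Decidable (Spec_split_into_units_py text split_by out) := by unfold Spec_split_into_units_py; infer_instance

-- ===== CLAIM (what is proved, stated in full; the proofs are below) =====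
def Claim_equal_split_into_units_py : Prop := ∀ (text : String) (split_by : String), Dom_split_into_units_py text split_by → Pre_split_into_units_py text split_by → Spec_split_into_units_py text split_by (split_into_units_py text split_by)

-- ===== LEMMAS AND PROOFS =====

-- find characterisation helpers -----------------------------------------------

theorem pvFind_eq_of (l sep : List Char) (n : Nat) (h1 : sep <+: l.drop n)
    (h2 : ∀ i < n, ¬ sep <+: l.drop i) : PySem.Chars.find l sep = (n : Int) := by
  have hinf : sep <:+: l := h1.isInfix.trans (l.drop_suffix n).isInfix
  have hnn : 0 ≤ PySem.Chars.find l sep := (PySem.Chars.find_nonneg_iff l sep).mpr hinf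
  have hspec := PySem.Chars.find_spec hnn
  have : (PySem.Chars.find l sep).toNat = n := by
    rcases Nat.lt_trichotomy (PySem.Chars.find l sep).toNat n with h | h | h
    · exact absurd hspec.1 (h2 _ h)
    · exact h
    · exact absurd h1 (hspec.2 _ h)
  omega

theorem pvFind_nil_of_ne (sep : List Char) (hsep : sep ≠ []) :
    PySem.Chars.find [] sep = -1 := by
  rw [PySem.Chars.find_eq_neg_one_iff]
  intro hinf
  exact hsep (List.eq_nil_of_infix_nil hinf)

-- proof-side canonical form of str.split(sep) (first occurrence cut off each step)
def splitRec (sep l : List Char) : List (List Char) :=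
  let p := PySem.Chars.find l sep
  if sep.length = 0 ∨ p = -1 then [l]
  else l.take p.toNat :: splitRec sep (l.drop (p.toNat + sep.length))
termination_by l.length
decreasing_by
  rename_i h
  rw [not_or] at h
  have hinf : sep <:+: l := (PySem.Chars.find_ne_neg_one_iff l sep).mp h.2
  have hl : 0 < l.length :=
    lt_of_lt_of_le (List.length_pos_iff.mpr (fun hs => h.1 (by simp [hs]))) hinf.length_le
  have hsep : 0 < sep.length := Nat.pos_of_ne_zero h.1
  simp only [List.length_drop]
  omega

theorem splitRec_neg (sep l : List Char) (hf : PySem.Chars.find l sep = -1) :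
    splitRec sep l = [l] := by
  rw [splitRec]; simp [hf]

theorem splitRec_pos (sep l : List Char) (hsl : sep.length ≠ 0)
    (hf : PySem.Chars.find l sep ≠ -1) :
    splitRec sep l = l.take (PySem.Chars.find l sep).toNat
      :: splitRec sep (l.drop ((PySem.Chars.find l sep).toNat + sep.length)) := by
  conv_lhs => rw [splitRec]
  simp [hsl, hf]

theorem altScan_neg (sep l : List Char) (hf : PySem.Chars.find l sep = -1) :
    altScan sep l = [l] := by
  rw [altScan]; simp [hf]

theorem altScan_pos (sep l : List Char) (hsl : sep.length ≠ 0)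
    (hf : PySem.Chars.find l sep ≠ -1) :
    altScan sep l = l.take ((PySem.Chars.find l sep).toNat + sep.length)
      :: altScan sep (l.drop ((PySem.Chars.find l sep).toNat + sep.length)) := by
  conv_lhs => rw [altScan]
  simp [hsl, hf]

theorem splitRec_ne_nil (sep l : List Char) : splitRec sep l ≠ [] := by
  rw [splitRec]
  split <;> simp

theorem splitRec_cons_not_prefix (sep : List Char) (hsep : sep ≠ []) (c : Char)
    (rest : List Char) (h : ¬ sep <+: (c :: rest)) :
    splitRec sep (c :: rest) = (splitRec sep rest).modifyHead (c :: ·) := by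
  have hsl : sep.length ≠ 0 := by simpa using hsep
  by_cases hr : PySem.Chars.find rest sep = -1
  · have hinf : ¬ sep <:+: rest := (PySem.Chars.find_eq_neg_one_iff rest sep).mp hr
    have hc : PySem.Chars.find (c :: rest) sep = -1 := by
      rw [PySem.Chars.find_eq_neg_one_iff]
      intro hx
      rcases List.infix_cons_iff.mp hx with hx | hx
      · exact h hx
      · exact hinf hx
    rw [splitRec_neg sep _ hc, splitRec_neg sep _ hr]
    simp
  · have hnn : 0 ≤ PySem.Chars.find rest sep := by
      have := (PySem.Chars.find_ne_neg_one_iff rest sep).mp hr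
      exact (PySem.Chars.find_nonneg_iff rest sep).mpr this
    set m : Nat := (PySem.Chars.find rest sep).toNat with hm
    have hspec := PySem.Chars.find_spec hnn
    have hcfind : PySem.Chars.find (c :: rest) sep = ((m + 1 : Nat) : Int) := by
      apply pvFind_eq_of
      · simpa using hspec.1
      · intro i hi
        match i with
        | 0 => simpa using h
        | j + 1 =>
          simp only [List.drop_succ_cons]
          exact hspec.2 j (by omega)
    have hcr : PySem.Chars.find (c :: rest) sep ≠ -1 := by rw [hcfind]; omega
    rw [splitRec_pos sep _ hsl hcr, splitRec_pos sep _ hsl hr, hcfind]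
    have ht : ((m + 1 : Nat) : Int).toNat = m + 1 := by omega
    rw [ht, List.modifyHead_cons, List.take_succ_cons, Nat.add_right_comm, List.drop_succ_cons, hm]

theorem pvGo_spec (sep : List Char) (hsep : sep ≠ []) (fuel : Nat) :
    ∀ (l cur : List Char) (acc : List (List Char)), l.length < fuel →
      PySem.Chars.splitOn.go sep fuel l cur acc
        = acc.reverse ++ (splitRec sep l).modifyHead (cur.reverse ++ ·) := by
  induction fuel with
  | zero => intro l cur acc h; omega
  | succ n ih =>
    have hs1 : 1 ≤ sep.length := Nat.pos_of_ne_zero (by simpa using hsep)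
    intro l cur acc h
    match l with
    | [] =>
      rw [PySem.Chars.splitOn.go]
      · rw [splitRec_neg sep [] (pvFind_nil_of_ne sep hsep)]
        simp
      · omega
    | c :: rest =>
      rw [PySem.Chars.splitOn.go]
      by_cases hp : sep.isPrefixOf (c :: rest) = true
      · simp only [hp, if_true]
        rw [ih _ _ _ (by simp only [List.length_drop, List.length_cons]; simp only [List.length_cons] at h; omega)]
        have hpre : sep <+: (c :: rest) := List.isPrefixOf_iff_prefix.mp hp
        have hfind : PySem.Chars.find (c :: rest) sep = ((0 : Nat) : Int) :=
          pvFind_eq_of _ _ 0 (by simpa using hpre) (by omega)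
        have hne : PySem.Chars.find (c :: rest) sep ≠ -1 := by rw [hfind]; decide
        have hsl : sep.length ≠ 0 := by simpa using hsep
        rw [splitRec_pos sep _ hsl hne, hfind]
        cases hres : splitRec sep ((c :: rest).drop (((0:Nat):Int).toNat + sep.length)) with
        | nil => exact absurd hres (splitRec_ne_nil _ _)
        | cons r rs =>
          simp only [Int.toNat_natCast, Nat.zero_add] at hres ⊢
          rw [hres]
          simp
      · rw [if_neg hp, ih _ _ _ (by simp only [List.length_cons] at h; omega)]
        have hnp : ¬ sep <+: (c :: rest) := fun hx => hp (List.isPrefixOf_iff_prefix.mpr hx)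
        rw [splitRec_cons_not_prefix sep hsep c rest hnp]
        cases splitRec sep rest with
        | nil => simp
        | cons r rs => simp

theorem pvSplitOn_eq_splitRec (l sep : List Char) (hsep : sep ≠ []) :
    PySem.Chars.splitOn l sep = splitRec sep l := by
  rw [PySem.Chars.splitOn, pvGo_spec sep hsep (l.length + 1) l [] [] (by omega)]
  cases h : splitRec sep l with
  | nil => exact absurd h (splitRec_ne_nil _ _)
  | cons r rs => simp

theorem pvAddSep_splitRec_eq_altScan (sep : List Char) (hsep : sep ≠ []) (l : List Char) :
    pyAddSepButLast (splitRec sep l) sep = altScan sep l := by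
  have hsl : sep.length ≠ 0 := by simpa using hsep
  by_cases hf : PySem.Chars.find l sep = -1
  · rw [splitRec_neg sep l hf, altScan_neg sep l hf, pyAddSepButLast]
  · rw [splitRec_pos sep l hsl hf, altScan_pos sep l hsl hf]
    have hnn : 0 ≤ PySem.Chars.find l sep :=
      (PySem.Chars.find_nonneg_iff l sep).mpr ((PySem.Chars.find_ne_neg_one_iff l sep).mp hf)
    set m : Nat := (PySem.Chars.find l sep).toNat with hm
    have hspec := PySem.Chars.find_spec hnn
    have htake : l.take m ++ sep = l.take (m + sep.length) := by
      rw [List.take_add]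
      congr 1
      exact List.prefix_iff_eq_take.mp (hm ▸ hspec.1)
    cases hres : splitRec sep (l.drop (m + sep.length)) with
    | nil => exact absurd hres (splitRec_ne_nil _ _)
    | cons r rs =>
      have hstep : pyAddSepButLast (l.take m :: r :: rs) sep
          = (l.take m ++ sep) :: pyAddSepButLast (r :: rs) sep := rfl
      rw [hstep, ← hres,
        pvAddSep_splitRec_eq_altScan sep hsep (l.drop (m + sep.length)), htake]
termination_by l.length
decreasing_by
  have hinf : sep <:+: l := (PySem.Chars.find_ne_neg_one_iff l sep).mp hf
  have hl : 0 < l.length :=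
    lt_of_lt_of_le (List.length_pos_iff.mpr (fun hs => hsep (by simp [hs]))) hinf.length_le
  have hsp : 0 < sep.length := Nat.pos_of_ne_zero hsl
  simp only [List.length_drop]
  omega

theorem pvKeep_eq (text sep : String) (hsep : sep.toList ≠ []) :
    pySplitKeepA text sep = pySplitKeepB text sep := by
  rw [pySplitKeepA, pySplitKeepB, pvSplitOn_eq_splitRec _ _ hsep,
    pvAddSep_splitRec_eq_altScan _ hsep]

-- ===== VERDICT (by name: the statement is the Claim_ definition above) =====
theorem split_into_units_py_spec : Claim_equal_split_into_units_py := by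
  intro text split_by _hdom hpre
  unfold Spec_split_into_units_py split_into_units_py split_into_units_py_alt
  rcases hpre with h | h | h <;> subst h <;>
    simp only [beq_self_eq_true, if_true, String.reduceBEq] <;>
    exact pvKeep_eq _ _ (by decide)
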